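-- pv_equiv track=rewrite | github.com/akashkthkr/MWDB_Group1 | Phase3/pprc.py | filter_by_Y
-- ===== SOURCE A (Python) =====
-- def filter_by_Y(data):
--     result = {}
--
--     for item in data:
--         label = item.split('-')[2]
--         try:
--             result[f"{label}"].append(item)
--         except:
--             result[f"{label}"] = []
--             result[f"{label}"].append(item)
--
--     return result
-- ===== SOURCE B (Python) =====
-- def filter_by_Y(data):
--     # Two-pass strategy: first collect the distinct third fields in first-occurrence
--     # order, then build each group with one comprehension over the whole list.
--     keys = []
--     for item in data:
--         k = item.split('-')[2]
--         if k not in keys: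
--             keys.append(k)
--     return {k: [item for item in data if item.split('-')[2] == k] for k in keys}
-- ===== Notes on version B (the rewrite author's own statement) =====
-- stated objective: alternative
-- what changed: Replaces the single insertion pass into a dict (try/except append-or-create) by a two-pass strategy: dedup the distinct third fields in first-occurrence order, then build each group with a per-key comprehension over the whole list.
import Mathlib
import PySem

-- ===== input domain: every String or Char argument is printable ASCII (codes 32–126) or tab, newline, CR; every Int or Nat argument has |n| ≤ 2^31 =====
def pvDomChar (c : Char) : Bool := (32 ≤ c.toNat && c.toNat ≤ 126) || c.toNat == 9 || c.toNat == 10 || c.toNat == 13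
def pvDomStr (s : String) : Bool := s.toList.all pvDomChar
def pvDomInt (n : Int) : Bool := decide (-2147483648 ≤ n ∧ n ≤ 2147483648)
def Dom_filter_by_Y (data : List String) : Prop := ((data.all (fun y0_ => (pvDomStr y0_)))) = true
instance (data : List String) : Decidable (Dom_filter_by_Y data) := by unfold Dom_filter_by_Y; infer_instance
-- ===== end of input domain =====

-- B replaces A's single dict-insertion pass (try/except append-or-create) by a two-pass
-- strategy: dedup the distinct third fields in first-occurrence order, then one filter per key.


-- ===== PORT A =====
-- item.split('-')[2]; split? is none only for sep = "" (never here), pyGet? is none on IndexError (excluded by Pre_)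
def pvLabel? (s : String) : Option String :=
  match PySem.Str.split? s "-" with
  | none => none
  | some parts => PySem.List.pyGet? parts (2 : Int)

-- one iteration of A's loop: try append; except create then append
def pvStepA (d : PySem.Dict String (List String)) (item : String) :
    PySem.Dict String (List String) :=
  match pvLabel? item with
  | none => d            -- IndexError: unreachable under Pre_
  | some label =>
    match d.get? label with
    | some xs => d.insert label (xs ++ [item])
    | none =>
      let d1 := d.insert label []
      d1.insert label (d1.getD label [] ++ [item])

def filter_by_Y (data : List String) : List (String × List String) :=
  (data.foldl pvStepA PySem.Dict.empty).items

-- ===== PORT B =====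
-- first pass of B: 'if k not in keys: keys.append(k)'
def pvKeyStep (ks : List String) (item : String) : List String :=
  match pvLabel? item with
  | none => ks           -- IndexError: unreachable under Pre_
  | some k => if k ∈ ks then ks else ks ++ [k]

def filter_by_Y_alt (data : List String) : List (String × List String) :=
  let keys := data.foldl pvKeyStep []
  keys.map (fun k => (k, data.filter (fun item => pvLabel? item == some k)))

-- ===== PRECONDITION & SPEC =====
-- Pre_ excludes exactly the inputs containing an item with fewer than two '-' separators,
-- on which A's 'item.split('-')[2]' raises IndexError.
def Pre_filter_by_Y (data : List String) : Prop :=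
  ∀ s ∈ data, 3 ≤ ((PySem.Str.split? s "-").getD []).length
instance (data : List String) : Decidable (Pre_filter_by_Y data) := by
  unfold Pre_filter_by_Y; infer_instance

def pvWitness_filter_by_Y : List String := ["a-b-c", "a-b-c-d", "x-y-c", "--"]

def Spec_filter_by_Y (data : List String) (out : List (String × List String)) : Prop := out = filter_by_Y_alt data
instance (data : List String) (out : List (String × List String)) : Decidable (Spec_filter_by_Y data out) := by unfold Spec_filter_by_Y; infer_instance

-- ===== CLAIM (what is proved, stated in full; the proofs are below) =====
def Claim_equal_filter_by_Y : Prop := ∀ (data : List String), Dom_filter_by_Y data → Pre_filter_by_Y data → Spec_filter_by_Y data (filter_by_Y data)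

-- ===== LEMMAS AND PROOFS =====

-- membership in B's key list: exactly the labels occurring in the processed prefix
lemma mem_foldl_keyStep (l : List String) (ks : List String) (k : String) :
    k ∈ l.foldl pvKeyStep ks ↔ k ∈ ks ∨ ∃ it ∈ l, pvLabel? it = some k := by
  induction l generalizing ks with
  | nil => simp
  | cons x t ih =>
    simp only [List.foldl_cons, ih, List.mem_cons]
    unfold pvKeyStep
    cases h : pvLabel? x with
    | none =>
      constructor
      · rintro (hk | ⟨it, hit, hl⟩)
        · exact Or.inl hk
        · exact Or.inr ⟨it, Or.inr hit, hl⟩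
      · rintro (hk | ⟨it, (rfl | hit), hl⟩)
        · exact Or.inl hk
        · simp [h] at hl
        · exact Or.inr ⟨it, hit, hl⟩
    | some kx =>
      by_cases hm : kx ∈ ks
      · simp only [if_pos hm]
        constructor
        · rintro (hk | ⟨it, hit, hl⟩)
          · exact Or.inl hk
          · exact Or.inr ⟨it, Or.inr hit, hl⟩
        · rintro (hk | ⟨it, (rfl | hit), hl⟩)
          · exact Or.inl hk
          · rw [h] at hl; injection hl with e; subst e; exact Or.inl hm
          · exact Or.inr ⟨it, hit, hl⟩
      · simp only [if_neg hm, List.mem_append, List.mem_singleton]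
        constructor
        · rintro ((hk | rfl) | ⟨it, hit, hl⟩)
          · exact Or.inl hk
          · exact Or.inr ⟨x, Or.inl rfl, h⟩
          · exact Or.inr ⟨it, Or.inr hit, hl⟩
        · rintro (hk | ⟨it, (rfl | hit), hl⟩)
          · exact Or.inl (Or.inl hk)
          · rw [h] at hl; injection hl with e; subst e; exact Or.inl (Or.inr rfl)
          · exact Or.inr ⟨it, hit, hl⟩

lemma nodup_foldl_keyStep (l : List String) (ks : List String) (h : ks.Nodup) :
    (l.foldl pvKeyStep ks).Nodup := by
  induction l generalizing ks with
  | nil => exact h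
  | cons x t ih =>
    simp only [List.foldl_cons]
    apply ih
    unfold pvKeyStep
    cases pvLabel? x with
    | none => exact h
    | some kx =>
      by_cases hm : kx ∈ ks
      · show (if kx ∈ ks then ks else ks ++ [kx]).Nodup
        simpa [hm]
      · show (if kx ∈ ks then ks else ks ++ [kx]).Nodup
        rw [if_neg hm, List.nodup_append]
        refine ⟨h, List.nodup_singleton _, ?_⟩
        intro a ha b hb
        simp only [List.mem_singleton] at hb
        exact fun e => hm ((e.trans hb) ▸ ha)

-- the invariant: A's dict after any prefix IS B's table for that prefix
lemma foldl_stepA_items (pref : List String)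
    (h : ∀ s ∈ pref, (pvLabel? s).isSome) :
    (pref.foldl pvStepA PySem.Dict.empty).items
      = (pref.foldl pvKeyStep []).map
          (fun k => (k, pref.filter (fun item => pvLabel? item == some k))) := by
  induction pref using List.reverseRecOn with
  | nil => rfl
  | append_singleton pref x ih =>
    have hpref : ∀ s ∈ pref, (pvLabel? s).isSome := fun s hs => h s (by simp [hs])
    have hx : (pvLabel? x).isSome := h x (by simp)
    obtain ⟨k, hk⟩ : ∃ k, pvLabel? x = some k := by
      cases hxl : pvLabel? x with
      | none => rw [hxl] at hx; simp at hx
      | some k => exact ⟨k, rfl⟩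
    have ihe := ih hpref
    rw [List.foldl_append, List.foldl_append]
    simp only [List.foldl_cons, List.foldl_nil]
    set d := pref.foldl pvStepA PySem.Dict.empty with hd
    set ks := pref.foldl pvKeyStep [] with hks
    have hkeys : d.keys = ks := by
      show d.items.map (·.1) = ks
      rw [ihe, List.map_map]
      simp [Function.comp_def]
    have hnodup : d.keys.Nodup := by
      rw [hkeys]; exact nodup_foldl_keyStep pref [] List.nodup_nil
    simp only [pvStepA, pvKeyStep, hk]
    by_cases hm : k ∈ ks
    · -- existing key: A appends to the entry, B's filter over pref ++ [x] grows at k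
      have hget : d.get? k = some (pref.filter (fun item => pvLabel? item == some k)) := by
        apply PySem.Dict.get?_of_mem_items d _ hnodup
        rw [ihe]
        exact List.mem_map.mpr ⟨k, hm, rfl⟩
      rw [hget]
      rw [PySem.Dict.items_insert_of_contains d _
            ((PySem.Dict.contains_iff_mem_keys d k).mpr (hkeys ▸ hm)),
          ihe, List.map_map, if_pos hm]
      apply List.map_congr_left
      intro k' hk'
      simp only [Function.comp]
      by_cases he : k' = k
      · subst he
        simp [List.filter_append, hk]
      · have hb : (k' == k) = false := by simp [he]
        have hb2 : (pvLabel? x == some k') = false := by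
          simp only [hk]; simp; exact fun e => he e.symm
        simp [hb, List.filter_append, hb2]
    · -- new key: A creates [] then appends; the new pair goes to the end
      have hget : d.get? k = none := by
        rw [PySem.Dict.get?_eq_none_iff_not_mem_keys, hkeys]; exact hm
      rw [hget]
      simp only [PySem.Dict.getD_insert_self, List.nil_append,
        PySem.Dict.insert_insert_self]
      have hcont : d.contains k = false := by
        rw [← Bool.not_eq_true, PySem.Dict.contains_iff_mem_keys, hkeys]
        simpa using hm
      rw [PySem.Dict.items_insert_of_not_contains d _ hcont, ihe, if_neg hm,
          List.map_append]
      congr 1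
      · apply List.map_congr_left
        intro k' hk'
        have hne : k' ≠ k := fun e => hm (e ▸ hk')
        have hb2 : (pvLabel? x == some k') = false := by
          simp only [hk]; simp; exact fun e => hne e.symm
        simp [List.filter_append, hb2]
      · have hfil : pref.filter (fun item => pvLabel? item == some k) = [] := by
          rw [List.filter_eq_nil_iff]
          intro it hit hl
          apply hm
          rw [hks, mem_foldl_keyStep]
          exact Or.inr ⟨it, hit, by simpa using hl⟩
        simp [List.filter_append, hfil, hk]

-- ===== VERDICT (by name: the statement is the Claim_ definition above) =====
theorem filter_by_Y_spec : Claim_equal_filter_by_Y := by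
  intro data _ hpre
  unfold Spec_filter_by_Y filter_by_Y filter_by_Y_alt
  apply foldl_stepA_items
  intro s hs
  have h3 := hpre s hs
  unfold pvLabel?
  cases hsp : PySem.Str.split? s "-" with
  | none => rw [hsp] at h3; simp at h3
  | some parts =>
    rw [hsp] at h3
    simp only [Option.getD_some] at h3
    have h2 : PySem.List.pyIdx? parts.length 2 = some 2 := by
      simp [PySem.List.pyIdx?]; omega
    simp [PySem.List.pyGet?, h2]
    omega
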